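-- pv_equiv track=rewrite | github.com/ahanakaura/100-days-of-code | proj2_word_to_nums.py | combine_under999
-- ===== SOURCE A (Python) =====
-- def combine_under999(numbers):
--     # to use after mult_999 and add_under999
--     hold = 0
--     output = []
--     for element in numbers:
--         if element < 1000:
--             hold += element
--         else:
--             output.append(hold)
--             output.append(element)
--             hold = 0
--     if hold > 0:
--         output.append(hold)
--     return output
-- ===== SOURCE B (Python) =====
-- def _runs(numbers):
--     # split into maximal runs of elements with equal key (key = not (e < 1000))
--     runs = []
--     i = 0
--     n = len(numbers)
--     while i < n:
--         big = not (numbers[i] < 1000)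
--         j = i + 1
--         while j < n and (not (numbers[j] < 1000)) == big:
--             j += 1
--         runs.append((big, numbers[i:j]))
--         i = j
--     return runs
--
-- def combine_under999(numbers):
--     output = []
--     hold = 0
--     for big, run in _runs(numbers):
--         if big:
--             for element in run:
--                 output.append(hold)
--                 output.append(element)
--                 hold = 0
--         else:
--             hold += sum(run)
--     if hold > 0:
--         output.append(hold)
--     return output
-- ===== Notes on version B (the rewrite author's own statement) =====
-- stated objective: alternative
-- what changed: B first splits the input into maximal runs grouped by the key not(e<1000) and then processes whole runs (summing a small run at once, emitting hold/0 prefixes along a big run), instead of A's single element-by-element pass with an accumulator.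
import Mathlib
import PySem

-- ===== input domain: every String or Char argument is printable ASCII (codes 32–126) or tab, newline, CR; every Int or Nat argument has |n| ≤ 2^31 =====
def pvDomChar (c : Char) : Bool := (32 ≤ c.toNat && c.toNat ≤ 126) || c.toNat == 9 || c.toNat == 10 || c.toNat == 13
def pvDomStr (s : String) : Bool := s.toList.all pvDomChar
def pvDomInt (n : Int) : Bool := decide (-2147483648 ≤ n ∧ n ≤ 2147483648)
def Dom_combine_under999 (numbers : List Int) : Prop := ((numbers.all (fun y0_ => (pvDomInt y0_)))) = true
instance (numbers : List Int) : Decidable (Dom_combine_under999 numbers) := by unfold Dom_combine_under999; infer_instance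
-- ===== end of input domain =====

-- B groups the numbers into maximal runs by the key not(e<1000) and processes whole runs;
-- A makes one element-by-element pass with an accumulator. Same values, alternative structure.

-- ===== PORT A =====
-- the for-loop of A, state (hold, output)
def pvALoop (hold : Int) (output : List Int) : List Int → Int × List Int
  | [] => (hold, output)
  | e :: rest =>
    if e < 1000 then pvALoop (hold + e) output rest
    else pvALoop 0 (output ++ [hold, e]) rest

def combine_under999 (numbers : List Int) : List Int :=
  let r := pvALoop 0 [] numbers
  if r.1 > 0 then r.2 ++ [r.1] else r.2

-- ===== PORT B =====
-- Source B's _runs: split into maximal runs keyed by not(e<1000) (inner while = span)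
def pvRuns : List Int → List (Bool × List Int)
  | [] => []
  | x :: xs =>
    let k : Bool := !(decide (x < 1000))
    (k, x :: xs.takeWhile (fun y => (!(decide (y < 1000))) == k)) ::
      pvRuns (xs.dropWhile (fun y => (!(decide (y < 1000))) == k))
termination_by xs => xs.length
decreasing_by
  simpa using Nat.lt_succ_of_le (List.length_dropWhile_le _ _)

-- the inner for-loop over a big run: append hold, append element, hold := 0
def pvBigEmit (hold : Int) : List Int → List Int
  | [] => []
  | e :: es => hold :: e :: pvBigEmit 0 es

-- the outer for-loop over the runs, returning what it appends to output
def pvProcRuns (hold : Int) : List (Bool × List Int) → List Int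
  | [] => if hold > 0 then [hold] else []
  | (big, run) :: rs =>
    if big then pvBigEmit hold run ++ pvProcRuns 0 rs
    else pvProcRuns (hold + run.sum) rs

def combine_under999_alt (numbers : List Int) : List Int :=
  pvProcRuns 0 (pvRuns numbers)

-- ===== PRECONDITION & SPEC =====
def Spec_combine_under999 (numbers : List Int) (out : List Int) : Prop := out = combine_under999_alt numbers
instance (numbers : List Int) (out : List Int) : Decidable (Spec_combine_under999 numbers out) := by unfold Spec_combine_under999; infer_instance

-- ===== CLAIM (what is proved, stated in full; the proofs are below) =====
def Claim_equal_combine_under999 : Prop := ∀ (numbers : List Int), Dom_combine_under999 numbers → Spec_combine_under999 numbers (combine_under999 numbers)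

-- ===== LEMMAS AND PROOFS =====

-- A's final wrap-up (append hold if positive)
def pvWrap (r : Int × List Int) : List Int := if r.1 > 0 then r.2 ++ [r.1] else r.2

theorem pvALoop_small (same : List Int) (h : ∀ y ∈ same, y < 1000) :
    ∀ hold output rest, pvALoop hold output (same ++ rest) = pvALoop (hold + same.sum) output rest := by
  induction same with
  | nil => intro hold output rest; simp
  | cons a t ih =>
    intro hold output rest
    have ha : a < 1000 := h a (by simp)
    simp only [List.cons_append, pvALoop, if_pos ha]
    rw [ih (fun y hy => h y (by simp [hy]))]
    simp [List.sum_cons, add_assoc]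

theorem pvALoop_big (same : List Int) (h : ∀ y ∈ same, ¬ y < 1000) :
    ∀ output rest, pvALoop 0 output (same ++ rest) = pvALoop 0 (output ++ pvBigEmit 0 same) rest := by
  induction same with
  | nil => intro output rest; simp [pvBigEmit]
  | cons a t ih =>
    intro output rest
    have ha : ¬ a < 1000 := h a (by simp)
    simp only [List.cons_append, pvALoop, if_neg ha]
    rw [ih (fun y hy => h y (by simp [hy]))]
    simp [pvBigEmit]

theorem pvMain : ∀ (n : Nat) (xs : List Int), xs.length ≤ n → ∀ hold output,
    pvWrap (pvALoop hold output xs) = output ++ pvProcRuns hold (pvRuns xs) := by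
  intro n
  induction n with
  | zero =>
    intro xs hlen hold output
    have : xs = [] := List.eq_nil_of_length_eq_zero (Nat.le_zero.mp hlen)
    subst this
    simp only [pvALoop, pvRuns, pvProcRuns, pvWrap]
    split_ifs <;> simp
  | succ n ih =>
    intro xs hlen hold output
    match xs with
    | [] =>
      simp only [pvALoop, pvRuns, pvProcRuns, pvWrap]
      split_ifs <;> simp
    | x :: xs =>
      have hxs : xs.length ≤ n := Nat.lt_succ_iff.mp (by simpa using hlen)
      by_cases hx : x < 1000
      · -- small run
        have hk : (!(decide (x < 1000))) = false := by simp [hx]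
        have hsplit := List.takeWhile_append_dropWhile
          (p := fun y => (!(decide (y < 1000))) == (false : Bool)) (l := xs)
        have hmem : ∀ y ∈ xs.takeWhile (fun y => (!(decide (y < 1000))) == (false : Bool)), y < 1000 := by
          intro y hy
          have := List.mem_takeWhile_imp hy
          simpa using this
        rw [pvRuns]
        simp only [hk, pvProcRuns]
        have hlhs : pvALoop hold output (x :: xs) =
            pvALoop (hold + x +
              (xs.takeWhile (fun y => (!(decide (y < 1000))) == (false : Bool))).sum) output
              (xs.dropWhile (fun y => (!(decide (y < 1000))) == (false : Bool))) := by
          rw [show pvALoop hold output (x :: xs) = pvALoop (hold + x) output xs by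
                simp [pvALoop, hx]]
          conv_lhs => rw [← hsplit]
          rw [pvALoop_small _ hmem]
        rw [hlhs, ih _ (le_trans (List.length_dropWhile_le _ _) hxs)]
        congr 2
        simp [List.sum_cons]; ring
      · -- big run
        have hk : (!(decide (x < 1000))) = true := by simp [hx]
        have hsplit := List.takeWhile_append_dropWhile
          (p := fun y => (!(decide (y < 1000))) == (true : Bool)) (l := xs)
        have hmem : ∀ y ∈ xs.takeWhile (fun y => (!(decide (y < 1000))) == (true : Bool)), ¬ y < 1000 := by
          intro y hy
          have := List.mem_takeWhile_imp hy
          simpa using this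
        rw [pvRuns]
        simp only [hk, pvProcRuns]
        have hlhs : pvALoop hold output (x :: xs) =
            pvALoop 0 ((output ++ [hold, x]) ++
              pvBigEmit 0 (xs.takeWhile (fun y => (!(decide (y < 1000))) == (true : Bool)))) 
              (xs.dropWhile (fun y => (!(decide (y < 1000))) == (true : Bool))) := by
          rw [show pvALoop hold output (x :: xs) = pvALoop 0 (output ++ [hold, x]) xs by
                simp [pvALoop, hx]]
          conv_lhs => rw [← hsplit]
          rw [pvALoop_big _ hmem]
        rw [hlhs, ih _ (le_trans (List.length_dropWhile_le _ _) hxs)]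
        simp [pvBigEmit]

-- ===== VERDICT (by name: the statement is the Claim_ definition above) =====
theorem combine_under999_spec : Claim_equal_combine_under999 := by
  intro numbers _
  show combine_under999 numbers = combine_under999_alt numbers
  have := pvMain numbers.length numbers le_rfl 0 []
  simpa [pvWrap, combine_under999, combine_under999_alt] using this
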